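-- pv_equiv track=rewrite | github.com/onlyfeng/engram | scripts/ci/ruff_metrics.py | aggregate_by_directory
-- ===== SOURCE A (Python) =====
-- from typing import Any
--
-- DIRECTORY_PREFIXES = [
--     "src/engram/gateway/",
--     "src/engram/logbook/",
--     "src/engram/",
--     "tests/gateway/",
--     "tests/logbook/",
--     "tests/",
--     "scripts/",
-- ]
--
-- def aggregate_by_directory(
--     violations: list[dict[str, Any]],
-- ) -> dict[str, dict[str, int]]:
--     """
--     按目录前缀聚合统计。
--
--     返回格式：
--     {
--         "src/engram/gateway/": {"count": 30, "fixable": 20},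
--         ...
--     }
--     """
--     result: dict[str, dict[str, int]] = {}
--
--     for prefix in DIRECTORY_PREFIXES:
--         count = 0
--         fixable = 0
--         for v in violations:
--             filename = v.get("filename", "")
--             if filename.startswith(prefix):
--                 count += 1
--                 if v.get("fix") is not None:
--                     fixable += 1
--         if count > 0:
--             result[prefix] = {"count": count, "fixable": fixable}
--
--     # 统计未分类的文件
--     other_count = 0
--     other_fixable = 0
--     for v in violations:
--         filename = v.get("filename", "")
--         if not any(filename.startswith(p) for p in DIRECTORY_PREFIXES):
--             other_count += 1
--             if v.get("fix") is not None:
--                 other_fixable += 1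
--
--     if other_count > 0:
--         result["other"] = {"count": other_count, "fixable": other_fixable}
--
--     return result
-- ===== SOURCE B (Python) =====
-- from typing import Any
--
-- DIRECTORY_PREFIXES = [
--     "src/engram/gateway/",
--     "src/engram/logbook/",
--     "src/engram/",
--     "tests/gateway/",
--     "tests/logbook/",
--     "tests/",
--     "scripts/",
-- ]
--
--
-- def aggregate_by_directory(
--     violations: list[dict[str, Any]],
-- ) -> dict[str, dict[str, int]]:
--     # Single pass over violations, scattering each into every matching
--     # prefix bucket (overlaps included) or the 'other' bucket.
--     acc = [(0, 0)] * len(DIRECTORY_PREFIXES)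
--     other = (0, 0)
--     for v in violations:
--         filename = v.get("filename", "")
--         fix = 1 if v.get("fix") is not None else 0
--         acc = [
--             (c + 1, f + fix) if filename.startswith(p) else (c, f)
--             for p, (c, f) in zip(DIRECTORY_PREFIXES, acc)
--         ]
--         if not any(filename.startswith(p) for p in DIRECTORY_PREFIXES):
--             other = (other[0] + 1, other[1] + fix)
--     result = {}
--     for p, (c, f) in zip(DIRECTORY_PREFIXES, acc):
--         if c > 0:
--             result[p] = {"count": c, "fixable": f}
--     if other[0] > 0:
--         result["other"] = {"count": other[0], "fixable": other[1]}
--     return result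
-- ===== Notes on version B (the rewrite author's own statement) =====
-- stated objective: alternative
-- what changed: A makes one full scan of violations per prefix plus an extra scan for 'other' (8 passes); B makes a single pass over violations maintaining per-prefix (count, fixable) accumulators and an 'other' accumulator, then emits the buckets with count > 0 in prefix order.
import Mathlib
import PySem

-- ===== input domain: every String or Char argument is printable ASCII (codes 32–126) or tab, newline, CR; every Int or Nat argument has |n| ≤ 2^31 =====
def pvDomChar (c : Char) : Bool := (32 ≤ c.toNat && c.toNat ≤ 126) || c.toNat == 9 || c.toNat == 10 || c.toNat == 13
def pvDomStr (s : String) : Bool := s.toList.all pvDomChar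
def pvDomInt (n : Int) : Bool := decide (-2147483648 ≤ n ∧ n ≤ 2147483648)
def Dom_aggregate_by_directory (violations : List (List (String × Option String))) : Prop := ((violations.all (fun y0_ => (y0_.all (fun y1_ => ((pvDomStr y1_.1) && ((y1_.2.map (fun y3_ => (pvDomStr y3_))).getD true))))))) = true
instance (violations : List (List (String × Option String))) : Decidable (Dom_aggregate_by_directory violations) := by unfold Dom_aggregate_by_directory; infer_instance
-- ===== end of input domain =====

-- B replaces A's per-prefix repeated scans of `violations` (plus a final 'other' scan)
-- by a single pass that scatters each violation into all matching prefix buckets; same values.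

-- ===== PORT A =====
def DIRECTORY_PREFIXES : List String :=
  ["src/engram/gateway/", "src/engram/logbook/", "src/engram/",
   "tests/gateway/", "tests/logbook/", "tests/", "scripts/"]

-- v.get("filename", "")  (Pre_ guarantees the value is never Python None, so .getD "" is exact there)
def pvGetFilename (v : List (String × Option String)) : String :=
  ((PySem.Dict.mk v).getD "filename" (some "")).getD ""

-- v.get("fix") is not None
def pvFix (v : List (String × Option String)) : Bool :=
  ((PySem.Dict.mk v).getD "fix" none).isSome

def aggregate_by_directory (violations : List (List (String × Option String))) : List (String × List (String × Int)) :=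
  let result : PySem.Dict String (List (String × Int)) :=
    DIRECTORY_PREFIXES.foldl (fun result prefix_ =>
      let cf : Int × Int := violations.foldl (fun cf v =>
        let filename := pvGetFilename v
        if PySem.Str.startswith filename prefix_ then
          (cf.1 + 1, if pvFix v then cf.2 + 1 else cf.2)
        else cf) (0, 0)
      if cf.1 > 0 then result.insert prefix_ [("count", cf.1), ("fixable", cf.2)]
      else result) PySem.Dict.empty
  let oth : Int × Int := violations.foldl (fun cf v =>
      let filename := pvGetFilename v
      if !(DIRECTORY_PREFIXES.any (fun p => PySem.Str.startswith filename p)) then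
        (cf.1 + 1, if pvFix v then cf.2 + 1 else cf.2)
      else cf) (0, 0)
  let result := if oth.1 > 0 then result.insert "other" [("count", oth.1), ("fixable", oth.2)]
                else result
  result.items

-- ===== PORT B =====
def aggregate_by_directory_alt (violations : List (List (String × Option String))) : List (String × List (String × Int)) :=
  let st : List (Int × Int) × Int × Int := violations.foldl (fun st v =>
      let filename := pvGetFilename v
      let fix : Int := if pvFix v then 1 else 0
      let acc := (DIRECTORY_PREFIXES.zip st.1).map (fun pc =>
          if PySem.Str.startswith filename pc.1 then (pc.2.1 + 1, pc.2.2 + fix) else pc.2)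
      if DIRECTORY_PREFIXES.any (fun p => PySem.Str.startswith filename p) then (acc, st.2)
      else (acc, st.2.1 + 1, st.2.2 + fix))
    (DIRECTORY_PREFIXES.map (fun _ => ((0 : Int), (0 : Int))), (0 : Int), (0 : Int))
  let result : List (String × List (String × Int)) := (DIRECTORY_PREFIXES.zip st.1).foldl
      (fun r pc => if pc.2.1 > 0 then r ++ [(pc.1, [("count", pc.2.1), ("fixable", pc.2.2)])] else r) []
  if st.2.1 > 0 then result ++ [("other", [("count", st.2.1), ("fixable", st.2.2)])] else result

-- ===== PRECONDITION & SPEC =====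
-- Pre_ excludes violations whose "filename" entry is Python None: there A raises AttributeError at .startswith.
def Pre_aggregate_by_directory (violations : List (List (String × Option String))) : Prop :=
  ∀ v ∈ violations, (PySem.Dict.mk v).get? "filename" ≠ some none
instance (violations : List (List (String × Option String))) : Decidable (Pre_aggregate_by_directory violations) := by unfold Pre_aggregate_by_directory; infer_instance

def pvWitness_aggregate_by_directory : (List (List (String × Option String))) :=
  [[("filename", some "src/engram/a.py"), ("fix", some "x")], [("filename", some "elsewhere.py")]]

def Spec_aggregate_by_directory (violations : List (List (String × Option String))) (out : List (String × List (String × Int))) : Prop := out = aggregate_by_directory_alt violations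
instance (violations : List (List (String × Option String))) (out : List (String × List (String × Int))) : Decidable (Spec_aggregate_by_directory violations out) := by unfold Spec_aggregate_by_directory; infer_instance

-- ===== CLAIM (what is proved, stated in full; the proofs are below) =====
def Claim_equal_aggregate_by_directory : Prop := ∀ (violations : List (List (String × Option String))), Dom_aggregate_by_directory violations → Pre_aggregate_by_directory violations → Spec_aggregate_by_directory violations (aggregate_by_directory violations)

-- ===== LEMMAS AND PROOFS =====

-- A's per-prefix inner loop body
def pvStep (p : String) (cf : Int × Int) (v : List (String × Option String)) : Int × Int :=
  if PySem.Str.startswith (pvGetFilename v) p then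
    (cf.1 + 1, if pvFix v then cf.2 + 1 else cf.2)
  else cf

-- A's 'other' loop body
def pvOStep (cf : Int × Int) (v : List (String × Option String)) : Int × Int :=
  if !(DIRECTORY_PREFIXES.any (fun p => PySem.Str.startswith (pvGetFilename v) p)) then
    (cf.1 + 1, if pvFix v then cf.2 + 1 else cf.2)
  else cf

theorem pvBumpEq (p : String) (v : List (String × Option String)) (cf : Int × Int) :
    (if PySem.Str.startswith (pvGetFilename v) p then
       (cf.1 + 1, cf.2 + (if pvFix v then (1 : Int) else 0)) else cf) = pvStep p cf v := by
  unfold pvStep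
  by_cases h : PySem.Str.startswith (pvGetFilename v) p
  · simp only [h, if_true]
    by_cases hf : pvFix v <;> simp [hf]
  · simp only [h, Bool.false_eq_true, if_false]

-- B's accumulator invariant: the single pass computes, per prefix, exactly A's per-prefix fold.
theorem pvAccInv (vs : List (List (String × Option String))) :
    ∀ (g : String → Int × Int) (o : Int × Int),
    List.foldl (fun (st : List (Int × Int) × Int × Int) v =>
        let filename := pvGetFilename v
        let fix : Int := if pvFix v then 1 else 0
        let acc := (DIRECTORY_PREFIXES.zip st.1).map (fun pc =>
            if PySem.Str.startswith filename pc.1 then (pc.2.1 + 1, pc.2.2 + fix) else pc.2)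
        if DIRECTORY_PREFIXES.any (fun p => PySem.Str.startswith filename p) then (acc, st.2)
        else (acc, st.2.1 + 1, st.2.2 + fix))
      (DIRECTORY_PREFIXES.map g, o) vs
    = (DIRECTORY_PREFIXES.map (fun p => List.foldl (pvStep p) (g p) vs),
       List.foldl pvOStep o vs) := by
  induction vs with
  | nil => intro g o; rfl
  | cons v vs ih =>
    intro g o
    simp only [List.foldl_cons]
    have hzip : DIRECTORY_PREFIXES.zip (DIRECTORY_PREFIXES.map g)
        = DIRECTORY_PREFIXES.map (fun a => (a, g a)) :=
      List.map_prod_left_eq_zip.symm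
    have hmap : (DIRECTORY_PREFIXES.zip (DIRECTORY_PREFIXES.map g)).map (fun pc =>
          if PySem.Str.startswith (pvGetFilename v) pc.1 then
            (pc.2.1 + 1, pc.2.2 + (if pvFix v then (1 : Int) else 0)) else pc.2)
        = DIRECTORY_PREFIXES.map (fun p => pvStep p (g p) v) := by
      rw [hzip, List.map_map]
      refine List.map_congr_left (fun p _ => ?_)
      simpa using pvBumpEq p v (g p)
    by_cases h : DIRECTORY_PREFIXES.any (fun p => PySem.Str.startswith (pvGetFilename v) p)
    · simp only [h, if_true, hmap]
      have ho : pvOStep o v = o := by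
        unfold pvOStep; rw [h]; simp only [Bool.not_true, Bool.false_eq_true, if_false]
      rw [ih (fun p => pvStep p (g p) v) o, ho]
    · simp only [eq_false_of_ne_true h, Bool.false_eq_true, if_false, hmap]
      have ho : pvOStep o v = (o.1 + 1, o.2 + (if pvFix v then (1 : Int) else 0)) := by
        unfold pvOStep
        rw [eq_false_of_ne_true h]
        simp only [Bool.not_false, if_true]
        by_cases hf : pvFix v <;> simp [hf]
      rw [ih (fun p => pvStep p (g p) v) (o.1 + 1, o.2 + (if pvFix v then (1 : Int) else 0)), ← ho]
  
-- A's conditional-insert loop over fresh distinct keys builds its items list by appends.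
theorem pvItemsFold (qs : List String) : ∀ (d : PySem.Dict String (List (String × Int)))
    (cond : String → Prop) [DecidablePred cond] (val : String → List (String × Int)),
    qs.Nodup → (∀ q ∈ qs, d.contains q = false) →
    (qs.foldl (fun d q => if cond q then d.insert q (val q) else d) d).items
      = qs.foldl (fun r q => if cond q then r ++ [(q, val q)] else r) d.items := by
  induction qs with
  | nil => intro d cond _ val _ _; rfl
  | cons q qs ih =>
    intro d cond _ val hnd hfresh
    simp only [List.foldl_cons]
    by_cases hc : cond q
    · simp only [hc, if_true]
      have hq : d.contains q = false := hfresh q (List.mem_cons_self ..)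
      have hfresh' : ∀ r ∈ qs, (d.insert q (val q)).contains r = false := by
        intro r hr
        rw [PySem.Dict.contains_insert]
        have hne : r ≠ q := by
          rintro rfl; exact (List.nodup_cons.mp hnd).1 hr
        simp [hne, hfresh r (List.mem_cons_of_mem _ hr)]
      rw [ih (d.insert q (val q)) cond val (List.nodup_cons.mp hnd).2 hfresh',
          PySem.Dict.items_insert_of_not_contains _ _ hq]
    · simp only [hc, if_false]
      exact ih d cond val (List.nodup_cons.mp hnd).2
        (fun r hr => hfresh r (List.mem_cons_of_mem _ hr))

-- every key of the conditional-append list comes from qs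
theorem pvMemFold (qs : List String) : ∀ (cond : String → Prop) [DecidablePred cond]
    (val : String → List (String × Int)) (r0 : List (String × List (String × Int)))
    (x : String × List (String × Int)),
    x ∈ qs.foldl (fun r q => if cond q then r ++ [(q, val q)] else r) r0 →
    x ∈ r0 ∨ x.1 ∈ qs := by
  induction qs with
  | nil => intro _ _ _ _ _ h; exact Or.inl h
  | cons q qs ih =>
    intro cond _ val r0 x h
    simp only [List.foldl_cons] at h
    by_cases hc : cond q
    · simp only [hc, if_true] at h
      rcases ih cond val _ x h with h' | h'
      · rcases List.mem_append.mp h' with h'' | h''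
        · exact Or.inl h''
        · right
          have hx : x = (q, val q) := by simpa using h''
          rw [hx]; exact List.mem_cons_self ..
      · exact Or.inr (List.mem_cons_of_mem _ h')
    · simp only [hc, if_false] at h
      rcases ih cond val r0 x h with h' | h'
      · exact Or.inl h'
      · exact Or.inr (List.mem_cons_of_mem _ h')

-- ===== VERDICT (by name: the statement is the Claim_ definition above) =====
theorem aggregate_by_directory_spec : Claim_equal_aggregate_by_directory := by
  intro violations _ _
  show aggregate_by_directory violations = aggregate_by_directory_alt violations
  have hB := pvAccInv violations (fun _ => ((0 : Int), (0 : Int))) ((0 : Int), (0 : Int))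
  -- B's final state, written with the per-prefix folds
  have hB' : aggregate_by_directory_alt violations =
      (let oth := violations.foldl pvOStep (0, 0)
       let result := ((DIRECTORY_PREFIXES.zip (DIRECTORY_PREFIXES.map (fun p =>
           violations.foldl (pvStep p) (0, 0)))).foldl
         (fun r pc => if pc.2.1 > 0 then r ++ [(pc.1, [("count", pc.2.1), ("fixable", pc.2.2)])] else r) [])
       if oth.1 > 0 then result ++ [("other", [("count", oth.1), ("fixable", oth.2)])] else result) := by
    unfold aggregate_by_directory_alt
    rw [hB]
  rw [hB',
      show DIRECTORY_PREFIXES.zip (DIRECTORY_PREFIXES.map (fun p =>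
          violations.foldl (pvStep p) (0, 0)))
        = DIRECTORY_PREFIXES.map (fun a => (a, violations.foldl (pvStep a) (0, 0)))
        from List.map_prod_left_eq_zip.symm,
      List.foldl_map]
  -- A's result, written with the same per-prefix folds
  have hA' : aggregate_by_directory violations =
      (let oth := violations.foldl pvOStep (0, 0)
       let result := DIRECTORY_PREFIXES.foldl (fun d q =>
         if (violations.foldl (pvStep q) (0, 0)).1 > 0 then
           d.insert q [("count", (violations.foldl (pvStep q) (0, 0)).1),
                       ("fixable", (violations.foldl (pvStep q) (0, 0)).2)]
         else d) PySem.Dict.empty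
       (if oth.1 > 0 then result.insert "other" [("count", oth.1), ("fixable", oth.2)]
        else result).items) := rfl
  rw [hA']
  have hfold := pvItemsFold DIRECTORY_PREFIXES PySem.Dict.empty
    (fun q => (violations.foldl (pvStep q) (0, 0)).1 > 0)
    (fun q => [("count", (violations.foldl (pvStep q) (0, 0)).1),
               ("fixable", (violations.foldl (pvStep q) (0, 0)).2)])
    (by decide) (fun q _ => rfl)
  by_cases ho : (violations.foldl pvOStep (0, 0)).1 > 0
  · simp only [ho, if_true]
    have hother : (DIRECTORY_PREFIXES.foldl (fun d q =>
        if (violations.foldl (pvStep q) (0, 0)).1 > 0 then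
          d.insert q [("count", (violations.foldl (pvStep q) (0, 0)).1),
                      ("fixable", (violations.foldl (pvStep q) (0, 0)).2)]
        else d) PySem.Dict.empty).contains "other" = false := by
      rw [PySem.Dict.contains_eq_decide_mem_keys]
      simp only [PySem.Dict.keys, decide_eq_false_iff_not]
      intro hmem
      rcases List.mem_map.mp hmem with ⟨x, hx, hx1⟩
      rw [hfold] at hx
      rcases pvMemFold DIRECTORY_PREFIXES _ _ _ x hx with h' | h'
      · simp [PySem.Dict.empty] at h'
      · rw [hx1] at h'; revert h'; decide
    rw [PySem.Dict.items_insert_of_not_contains _ _ hother, hfold]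
    rfl
  · simp only [ho, if_false]
    rw [hfold]
    rfl
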